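-- pv_equiv track=rewrite | github.com/Comma0101/archon | archon/cli_commands.py | _picker_leaf_subvalues
-- ===== SOURCE A (Python) =====
-- def _picker_leaf_subvalues(values: list[tuple[str, str]]) -> list[tuple[str, str]]:
--     raw_values = [str(value or "").strip() for value, _desc in values]
--     leaf_items: list[tuple[str, str]] = []
--     for value, desc in values:
--         normalized = str(value or "").strip()
--         if not normalized:
--             continue
--         prefix = normalized + " "
--         if any(other.startswith(prefix) for other in raw_values if other != normalized):
--             continue
--         leaf_items.append((normalized, desc))
--     return leaf_items
-- ===== SOURCE B (Python) =====
-- def _picker_leaf_subvalues(values: list[tuple[str, str]]) -> list[tuple[str, str]]: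
--     # Build once: every prefix of a raw value that is immediately followed by a space.
--     # A value is a leaf iff it is non-empty and not such a space-prefix of some raw value.
--     space_prefixes = set()
--     for value, _desc in values:
--         raw = str(value or "").strip()
--         for i, ch in enumerate(raw):
--             if ch == " ":
--                 space_prefixes.add(raw[:i])
--     leaf_items: list[tuple[str, str]] = []
--     for value, desc in values:
--         normalized = str(value or "").strip()
--         if normalized and normalized not in space_prefixes:
--             leaf_items.append((normalized, desc))
--     return leaf_items
-- ===== Notes on version B (the rewrite author's own statement) =====
-- stated objective: faster
-- what changed: Instead of scanning all raw values per element with startswith (quadratic), B builds once a hash set of every prefix-before-a-space of each raw value and keeps an element iff its normalized form is non-empty and not in that set.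
import Mathlib
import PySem

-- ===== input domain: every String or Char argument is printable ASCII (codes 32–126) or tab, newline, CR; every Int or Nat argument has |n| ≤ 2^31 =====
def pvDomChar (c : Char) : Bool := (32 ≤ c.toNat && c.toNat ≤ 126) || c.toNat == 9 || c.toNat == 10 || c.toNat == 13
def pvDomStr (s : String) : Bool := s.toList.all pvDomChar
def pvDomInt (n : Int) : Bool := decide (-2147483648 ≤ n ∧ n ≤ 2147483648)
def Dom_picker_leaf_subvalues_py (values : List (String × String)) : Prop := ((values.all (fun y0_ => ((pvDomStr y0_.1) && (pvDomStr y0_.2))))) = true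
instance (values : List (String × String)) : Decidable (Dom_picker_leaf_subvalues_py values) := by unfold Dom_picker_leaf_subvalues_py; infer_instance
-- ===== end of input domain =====

-- B replaces A's per-element scan of all raw values with a set, built once, of every
-- prefix-before-a-space of each raw value; set membership then replaces the inner scan.

-- ===== PORT A =====
def picker_leaf_subvalues_py (values : List (String × String)) : List (String × String) :=
  let raw_values := values.map (fun p => PySem.Str.strip (if p.1 = "" then "" else p.1))
  values.foldl (fun leaf_items p =>
    let normalized := PySem.Str.strip (if p.1 = "" then "" else p.1)
    if normalized = "" then leaf_items
    else
      let pfx := normalized ++ " "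
      if raw_values.any (fun other => other ≠ normalized && PySem.Str.startswith other pfx) then
        leaf_items
      else leaf_items ++ [(normalized, p.2)]) []

-- ===== PORT B =====
def picker_leaf_subvalues_py_alt (values : List (String × String)) : List (String × String) :=
  let space_prefixes : PySem.Set String :=
    values.foldl (fun s p =>
      let raw := PySem.Str.strip (if p.1 = "" then "" else p.1)
      (PySem.List.enumerate raw.toList).foldl (fun s q =>
        if q.2 = ' ' then PySem.Set.add s (PySem.Str.slice raw none (some q.1)) else s) s)
      PySem.Set.empty
  values.foldl (fun leaf_items p =>
    let normalized := PySem.Str.strip (if p.1 = "" then "" else p.1)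
    if normalized ≠ "" ∧ PySem.Set.contains space_prefixes normalized = false then
      leaf_items ++ [(normalized, p.2)]
    else leaf_items) []

-- ===== PRECONDITION & SPEC =====
def Spec_picker_leaf_subvalues_py (values : List (String × String)) (out : List (String × String)) : Prop := out = picker_leaf_subvalues_py_alt values
instance (values : List (String × String)) (out : List (String × String)) : Decidable (Spec_picker_leaf_subvalues_py values out) := by unfold Spec_picker_leaf_subvalues_py; infer_instance

-- ===== CLAIM (what is proved, stated in full; the proofs are below) =====
def Claim_equal_picker_leaf_subvalues_py : Prop := ∀ (values : List (String × String)), Dom_picker_leaf_subvalues_py values → Spec_picker_leaf_subvalues_py values (picker_leaf_subvalues_py values)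

-- ===== LEMMAS AND PROOFS =====

-- membership in a foldl whose step adds (at most) one element, characterised by P
theorem pv_mem_foldl_iff {α β : Type} (F : List α → β → List α) (P : α → β → Prop)
    (h : ∀ s b x, x ∈ F s b ↔ x ∈ s ∨ P x b) :
    ∀ (l : List β) (s0 : List α) (x : α), x ∈ l.foldl F s0 ↔ x ∈ s0 ∨ ∃ b ∈ l, P x b := by
  intro l
  induction l with
  | nil => simp
  | cons b l ih =>
    intro s0 x
    simp only [List.foldl_cons, ih, h, List.mem_cons]
    constructor
    · rintro ((hx | hp) | ⟨c, hc, hpc⟩)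
      · exact Or.inl hx
      · exact Or.inr ⟨b, Or.inl rfl, hp⟩
      · exact Or.inr ⟨c, Or.inr hc, hpc⟩
    · rintro (hx | ⟨c, (rfl | hc), hpc⟩)
      · exact Or.inl (Or.inl hx)
      · exact Or.inl (Or.inr hpc)
      · exact Or.inr ⟨c, hc, hpc⟩

-- the inner fold of B: the space-prefixes contributed by one raw value
theorem pv_mem_inner (raw : String) (s0 : PySem.Set String) (x : String) :
    x ∈ (PySem.List.enumerate raw.toList).foldl (fun s (q : Int × Char) =>
        if q.2 = ' ' then PySem.Set.add s (PySem.Str.slice raw none (some q.1)) else s) s0 ↔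
      x ∈ s0 ∨ ∃ q ∈ PySem.List.enumerate raw.toList,
        q.2 = ' ' ∧ x = PySem.Str.slice raw none (some q.1) := by
  refine pv_mem_foldl_iff _
    (fun x (q : Int × Char) => q.2 = ' ' ∧ x = PySem.Str.slice raw none (some q.1)) ?_ _ _ _
  intro s q x
  by_cases hq : q.2 = ' ' <;> simp [hq, PySem.Set.mem_add]

-- membership in B's space_prefixes set
theorem pv_mem_prefixes (values : List (String × String)) (x : String) :
    x ∈ values.foldl (fun s p =>
        (PySem.List.enumerate (PySem.Str.strip (if p.1 = "" then "" else p.1)).toList).foldl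
          (fun s (q : Int × Char) =>
            if q.2 = ' ' then
              PySem.Set.add s
                (PySem.Str.slice (PySem.Str.strip (if p.1 = "" then "" else p.1)) none (some q.1))
            else s) s)
        PySem.Set.empty ↔
      ∃ p ∈ values, ∃ q ∈ PySem.List.enumerate (PySem.Str.strip (if p.1 = "" then "" else p.1)).toList,
        q.2 = ' ' ∧ x = PySem.Str.slice (PySem.Str.strip (if p.1 = "" then "" else p.1)) none (some q.1) := by
  rw [pv_mem_foldl_iff _
    (fun x (p : String × String) =>
      ∃ q ∈ PySem.List.enumerate (PySem.Str.strip (if p.1 = "" then "" else p.1)).toList,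
        q.2 = ' ' ∧ x = PySem.Str.slice (PySem.Str.strip (if p.1 = "" then "" else p.1)) none (some q.1))
    (fun s p x => pv_mem_inner _ s x)]
  simp [PySem.Set.empty]

-- "some space-prefix of raw equals n"  ↔  "raw starts with n ++ ' '"
theorem pv_prefix_iff_startswith (raw n : String) :
    (∃ q ∈ PySem.List.enumerate raw.toList, q.2 = ' ' ∧ n = PySem.Str.slice raw none (some q.1)) ↔
      PySem.Str.startswith raw (n ++ " ") = true := by
  constructor
  · rintro ⟨q, hq, hsp, rfl⟩
    rw [PySem.List.mem_enumerate_iff] at hq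
    obtain ⟨k, hk, rfl⟩ := hq
    simp only [zero_add] at hsp ⊢
    rw [PySem.Str.startswith_eq, PySem.Chars.startswith_iff, String.toList_append,
      PySem.Str.toList_slice]
    have hs : PySem.Chars.slice raw.toList none (some (k : Int)) = raw.toList.take k := by
      simp [PySem.Chars.slice, PySem.List.slice_to_natCast]
    rw [hs]
    refine ⟨raw.toList.drop (k + 1), ?_⟩
    have hdec : raw.toList = raw.toList.take k ++ raw.toList[k] :: raw.toList.drop (k + 1) := by
      conv_lhs => rw [← List.take_append_drop k raw.toList]
      rw [List.drop_eq_getElem_cons hk]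
    rw [hsp] at hdec
    simpa using hdec.symm
  · intro h
    rw [PySem.Str.startswith_eq, PySem.Chars.startswith_iff, String.toList_append] at h
    obtain ⟨t, ht⟩ := h
    have ht' : raw.toList = n.toList ++ ' ' :: t := by simpa using ht.symm
    refine ⟨((n.toList.length : Int), ' '), ?_, rfl, ?_⟩
    · rw [PySem.List.mem_enumerate_iff]
      refine ⟨n.toList.length, by simp [ht'], ?_⟩
      simp [ht']
    · apply String.toList_injective
      rw [PySem.Str.toList_slice]
      have hs : PySem.Chars.slice raw.toList none (some (n.toList.length : Int))
          = raw.toList.take n.toList.length := by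
        simp [PySem.Chars.slice, PySem.List.slice_to_natCast]
      simp [ht']

-- startswith (n ++ " ") forces other ≠ n
theorem pv_startswith_ne (other n : String) (h : PySem.Str.startswith other (n ++ " ") = true) :
    other ≠ n := by
  rw [PySem.Str.startswith_eq, PySem.Chars.startswith_iff, String.toList_append] at h
  intro hEq
  subst hEq
  have := h.length_le
  simp at this

-- A's inner any ↔ membership in B's set
theorem pv_cond_iff (values : List (String × String)) (n : String) :
    ((values.map (fun p => PySem.Str.strip (if p.1 = "" then "" else p.1))).any
        (fun other => other ≠ n && PySem.Str.startswith other (n ++ " ")) = true) ↔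
      n ∈ values.foldl (fun s p =>
        (PySem.List.enumerate (PySem.Str.strip (if p.1 = "" then "" else p.1)).toList).foldl
          (fun s (q : Int × Char) =>
            if q.2 = ' ' then
              PySem.Set.add s
                (PySem.Str.slice (PySem.Str.strip (if p.1 = "" then "" else p.1)) none (some q.1))
            else s) s)
        PySem.Set.empty := by
  rw [pv_mem_prefixes]
  simp only [List.any_map, List.any_eq_true, Function.comp]
  constructor
  · rintro ⟨p, hp, h⟩
    simp only [Bool.and_eq_true, decide_eq_true_eq] at h
    exact ⟨p, hp, (pv_prefix_iff_startswith _ n).2 h.2⟩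
  · rintro ⟨p, hp, h⟩
    have hs := (pv_prefix_iff_startswith (PySem.Str.strip (if p.1 = "" then "" else p.1)) n).1 h
    refine ⟨p, hp, ?_⟩
    rw [Bool.and_eq_true]
    exact ⟨decide_eq_true (pv_startswith_ne _ _ hs), hs⟩

-- ===== VERDICT (by name: the statement is the Claim_ definition above) =====
theorem picker_leaf_subvalues_py_spec : Claim_equal_picker_leaf_subvalues_py := by
  intro values _
  unfold Spec_picker_leaf_subvalues_py picker_leaf_subvalues_py picker_leaf_subvalues_py_alt
  show values.foldl (fun leaf_items p =>
      let normalized := PySem.Str.strip (if p.1 = "" then "" else p.1)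
      if normalized = "" then leaf_items
      else
        if (values.map (fun p => PySem.Str.strip (if p.1 = "" then "" else p.1))).any
            (fun other => other ≠ normalized && PySem.Str.startswith other (normalized ++ " ")) then
          leaf_items
        else leaf_items ++ [(normalized, p.2)]) []
    = values.foldl (fun leaf_items p =>
      let normalized := PySem.Str.strip (if p.1 = "" then "" else p.1)
      if normalized ≠ "" ∧ PySem.Set.contains
          (values.foldl (fun s p =>
            (PySem.List.enumerate (PySem.Str.strip (if p.1 = "" then "" else p.1)).toList).foldl
              (fun s (q : Int × Char) =>
                if q.2 = ' ' then
                  PySem.Set.add s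
                    (PySem.Str.slice (PySem.Str.strip (if p.1 = "" then "" else p.1)) none (some q.1))
                else s) s) PySem.Set.empty) normalized = false then
        leaf_items ++ [(normalized, p.2)]
      else leaf_items) []
  congr 1
  funext leaf_items p
  simp only []
  have hiff := pv_cond_iff values (PySem.Str.strip (if p.1 = "" then "" else p.1))
  by_cases hn : PySem.Str.strip (if p.1 = "" then "" else p.1) = ""
  · simp [hn]
  · by_cases hm : PySem.Str.strip (if p.1 = "" then "" else p.1) ∈
        values.foldl (fun s p =>
          (PySem.List.enumerate (PySem.Str.strip (if p.1 = "" then "" else p.1)).toList).foldl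
            (fun s (q : Int × Char) =>
              if q.2 = ' ' then
                PySem.Set.add s
                  (PySem.Str.slice (PySem.Str.strip (if p.1 = "" then "" else p.1)) none (some q.1))
              else s) s) PySem.Set.empty
    · have hany := hiff.2 hm
      have hcB : ¬ (PySem.Str.strip (if p.1 = "" then "" else p.1) ≠ "" ∧ PySem.Set.contains
          (values.foldl (fun s p =>
            (PySem.List.enumerate (PySem.Str.strip (if p.1 = "" then "" else p.1)).toList).foldl
              (fun s (q : Int × Char) =>
                if q.2 = ' ' then
                  PySem.Set.add s
                    (PySem.Str.slice (PySem.Str.strip (if p.1 = "" then "" else p.1)) none (some q.1))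
                  else s) s) PySem.Set.empty)
            (PySem.Str.strip (if p.1 = "" then "" else p.1)) = false) := by
        rintro ⟨-, hc⟩
        rw [Bool.eq_false_iff] at hc
        exact hc (List.elem_eq_true_of_mem hm)
      rw [if_neg hn, if_pos hany, if_neg hcB]
    · have hany : ¬ ((values.map (fun p => PySem.Str.strip (if p.1 = "" then "" else p.1))).any
          (fun other => other ≠ PySem.Str.strip (if p.1 = "" then "" else p.1) &&
            PySem.Str.startswith other (PySem.Str.strip (if p.1 = "" then "" else p.1) ++ " ")) = true) :=
        fun h => hm (hiff.1 h)
      have hcB : PySem.Str.strip (if p.1 = "" then "" else p.1) ≠ "" ∧ PySem.Set.contains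
          (values.foldl (fun s p =>
            (PySem.List.enumerate (PySem.Str.strip (if p.1 = "" then "" else p.1)).toList).foldl
              (fun s (q : Int × Char) =>
                if q.2 = ' ' then
                  PySem.Set.add s
                    (PySem.Str.slice (PySem.Str.strip (if p.1 = "" then "" else p.1)) none (some q.1))
                  else s) s) PySem.Set.empty)
            (PySem.Str.strip (if p.1 = "" then "" else p.1)) = false :=
        ⟨hn, by
          rw [Bool.eq_false_iff]
          intro hc
          exact hm (List.mem_of_elem_eq_true hc)⟩
      rw [if_neg hn, if_neg hany, if_pos hcB]
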